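-- pv_equiv track=rewrite | github.com/RadRSGroup/DPNR-Demo | agent-library/agent_library/orchestration/sefirot_orchestrator.py | _select_most_resonant_metaphors
-- ===== SOURCE A (Python) =====
-- from typing import Dict, List, Optional, Tuple, Any
--
-- def _select_most_resonant_metaphors(metaphors: List[str]) -> List[str]:
--     """Select most resonant metaphors from sefirot results"""
--     # Simple selection - return first 3 unique metaphors
--     unique_metaphors = []
--     for metaphor in metaphors:
--         if metaphor not in unique_metaphors:
--             unique_metaphors.append(metaphor)
--         if len(unique_metaphors) >= 3:
--             break
--
--     return unique_metaphors
-- ===== SOURCE B (Python) =====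
-- from typing import List
--
-- def _take_unique(ms: List[str], k: int) -> List[str]:
--     """Sieve: first unique is the head; the rest come from the tail with that value filtered out."""
--     if k == 0 or not ms:
--         return []
--     head = ms[0]
--     return [head] + _take_unique([x for x in ms[1:] if x != head], k - 1)
--
-- def _select_most_resonant_metaphors(metaphors: List[str]) -> List[str]:
--     """Select most resonant metaphors from sefirot results"""
--     return _take_unique(metaphors, 3)
-- ===== Notes on version B (the rewrite author's own statement) =====
-- stated objective: alternative
-- what changed: Replaces A's accumulator loop with membership test and early break by a recursive sieve: the head is the next unique element, occurrences of it are filtered out of the tail, and recursion proceeds with a budget decreasing from 3.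
import Mathlib
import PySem

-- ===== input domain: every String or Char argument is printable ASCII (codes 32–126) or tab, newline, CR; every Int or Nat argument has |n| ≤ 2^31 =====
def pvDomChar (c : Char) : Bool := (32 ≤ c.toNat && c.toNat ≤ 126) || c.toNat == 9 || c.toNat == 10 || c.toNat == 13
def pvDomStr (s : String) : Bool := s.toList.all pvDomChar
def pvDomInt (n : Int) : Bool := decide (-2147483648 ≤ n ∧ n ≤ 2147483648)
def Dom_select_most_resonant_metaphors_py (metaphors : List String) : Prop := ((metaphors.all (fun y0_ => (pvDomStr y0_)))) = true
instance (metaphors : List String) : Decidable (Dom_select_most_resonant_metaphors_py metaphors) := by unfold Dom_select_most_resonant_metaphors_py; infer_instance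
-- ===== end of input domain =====

-- B replaces A's accumulator loop (membership test + early break) by a recursive sieve: head, filter it from the tail, recurse with budget 3 (alternative decomposition; return value only).

-- ===== PORT A =====
-- A's loop: append if unseen, break as soon as 3 uniques are collected.
def pvLoopA : List String → List String → List String
  | [], acc => acc
  | m :: rs, acc =>
    let acc' := if acc.contains m then acc else acc ++ [m]
    if 3 ≤ acc'.length then acc' else pvLoopA rs acc'

def select_most_resonant_metaphors_py (metaphors : List String) : List String :=
  pvLoopA metaphors []

-- ===== PORT B =====
-- _take_unique: head is the next unique; filter it out of the tail; budget k
def pvTakeUnique : List String → Nat → List String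
  | _, 0 => []
  | [], _ => []
  | h :: t, k + 1 => h :: pvTakeUnique (t.filter (fun x => x ≠ h)) k

def select_most_resonant_metaphors_py_alt (metaphors : List String) : List String :=
  pvTakeUnique metaphors 3

-- ===== PRECONDITION & SPEC =====
def Spec_select_most_resonant_metaphors_py (metaphors : List String) (out : List String) : Prop := out = select_most_resonant_metaphors_py_alt metaphors
instance (metaphors : List String) (out : List String) : Decidable (Spec_select_most_resonant_metaphors_py metaphors out) := by unfold Spec_select_most_resonant_metaphors_py; infer_instance

-- ===== CLAIM (what is proved, stated in full; the proofs are below) =====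
def Claim_equal_select_most_resonant_metaphors_py : Prop := ∀ (metaphors : List String), Dom_select_most_resonant_metaphors_py metaphors → Spec_select_most_resonant_metaphors_py metaphors (select_most_resonant_metaphors_py metaphors)

-- ===== LEMMAS AND PROOFS =====

theorem pv_loop_eq_sieve (l : List String) : ∀ acc : List String, acc.length < 3 →
    pvLoopA l acc = acc ++ pvTakeUnique (l.filter (fun x => !acc.contains x)) (3 - acc.length) := by
  induction l with
  | nil =>
    intro acc h
    cases h3 : 3 - acc.length with
    | zero => omega
    | succ k => simp [pvLoopA, pvTakeUnique]
  | cons m rs ih =>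
    intro acc h
    cases hm : acc.contains m with
    | true =>
      have h3 : ¬ 3 ≤ acc.length := by omega
      simp only [pvLoopA, hm, if_true, if_neg h3, List.filter_cons, Bool.not_true,
        Bool.false_eq_true, if_false]
      exact ih acc h
    | false =>
      have hm' : m ∉ acc := by simpa using hm
      have hacc' : (if acc.contains m = true then acc else acc ++ [m]) = acc ++ [m] := by
        simp [hm']
      simp only [pvLoopA]
      rw [hacc']
      simp only [List.filter_cons, hm, Bool.not_false, if_true,
        List.length_append, List.length_cons, List.length_nil, Nat.zero_add]
      cases h3 : 3 - acc.length with
      | zero => omega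
      | succ k =>
        simp only [pvTakeUnique]
        by_cases hk : 3 ≤ acc.length + 1
        · rw [if_pos hk]
          have hk0 : k = 0 := by omega
          subst hk0
          simp [pvTakeUnique]
        · rw [if_neg hk]
          rw [ih (acc ++ [m]) (by simp; omega)]
          have hk3 : 3 - (acc ++ [m]).length = k := by simp; omega
          rw [hk3]
          have hfil : rs.filter (fun x => !(acc ++ [m]).contains x)
              = (rs.filter (fun x => !acc.contains x)).filter (fun x => decide (x ≠ m)) := by
            rw [List.filter_filter]
            apply List.filter_congr
            intro x _
            simp [List.contains_append, eq_comm, Bool.and_comm]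
          rw [hfil]
          simp

-- ===== VERDICT (by name: the statement is the Claim_ definition above) =====
theorem select_most_resonant_metaphors_py_spec : Claim_equal_select_most_resonant_metaphors_py := by
  intro metaphors _
  show pvLoopA metaphors [] = _
  rw [pv_loop_eq_sieve metaphors [] (by simp)]
  simp [select_most_resonant_metaphors_py_alt]
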